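-- pv_equiv track=rewrite | github.com/furkhat/DSaA-500 | arrays/sort_binary_array_in_linear_time.py | sort_by_placing_zeros_in_front
-- ===== SOURCE A (Python) =====
-- def sort_by_placing_zeros_in_front(arr):
--     """Iterates over the array and puts all zeros in front of the array.
--     The rest filled with ones.
--
--     Args:
--         arr: An array containing zeros and ones.
--     """
--     next_zeros_index = 0
--     for i, arr_i in enumerate(arr):
--         if arr_i == 0:
--             arr[next_zeros_index] = 0
--             next_zeros_index += 1
--     for i in range(next_zeros_index, len(arr)):
--         arr[i] = 1
--     return arr
-- ===== SOURCE B (Python) =====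
-- def sort_by_placing_zeros_in_front(arr):
--     front = []
--     back = []
--     for x in arr:
--         if x == 0:
--             front.append(0)
--         else:
--             back.append(1)
--     arr[:] = front + back
--     return arr
-- ===== Notes on version B (the rewrite author's own statement) =====
-- stated objective: alternative
-- what changed: Replaces A's in-place index-writing (cursor of next zero slot, then a range loop overwriting the tail with ones) with a single-pass bucket partition: each element is routed into a 'front' zeros list or a 'back' ones list, and the result is their concatenation.
import Mathlib
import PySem

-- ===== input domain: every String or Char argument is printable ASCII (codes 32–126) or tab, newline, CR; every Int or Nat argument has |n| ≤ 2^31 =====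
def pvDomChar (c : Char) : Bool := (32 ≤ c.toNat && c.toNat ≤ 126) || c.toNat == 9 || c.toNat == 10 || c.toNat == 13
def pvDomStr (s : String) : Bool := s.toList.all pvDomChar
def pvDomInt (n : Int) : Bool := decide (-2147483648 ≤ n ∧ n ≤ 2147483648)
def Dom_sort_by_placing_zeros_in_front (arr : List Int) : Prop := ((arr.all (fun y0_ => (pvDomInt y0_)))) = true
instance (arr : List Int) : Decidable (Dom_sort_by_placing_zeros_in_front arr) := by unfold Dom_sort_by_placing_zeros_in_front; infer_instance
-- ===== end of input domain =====

-- B replaces A's in-place index-writing loops with a one-pass bucket partition into a zeros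
-- list and a ones list, concatenated at the end (objective: alternative).
-- Both Pythons mutate arr in place; the equivalence proved here is about the RETURN value
-- (B performs the same in-place update via arr[:] = ...).

-- ===== PORT A =====
-- First loop: 'for i, arr_i in enumerate(arr)'; every write lands at an index ≤ the current
-- position (next_zeros_index ≤ i), so iterating the ORIGINAL elements is exact.
-- Second loop: 'for i in range(next_zeros_index, len(arr))'; every i is ≥ 0, so i.toNat is exact.
def sort_by_placing_zeros_in_front (arr : List Int) : List Int :=
  let st := arr.foldl (fun (s : List Int × Nat) arr_i =>
    if arr_i = 0 then (s.1.set s.2 0, s.2 + 1) else s) (arr, 0)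
  (PySem.List.pyRange (st.2 : Int) (st.1.length : Int) 1).foldl
    (fun l i => l.set i.toNat 1) st.1

-- ===== PORT B =====
def sort_by_placing_zeros_in_front_alt (arr : List Int) : List Int :=
  let st := arr.foldl (fun (s : List Int × List Int) x =>
    if x = 0 then (s.1 ++ [0], s.2) else (s.1, s.2 ++ [1])) ([], [])
  st.1 ++ st.2

-- ===== PRECONDITION & SPEC =====
def Spec_sort_by_placing_zeros_in_front (arr : List Int) (out : List Int) : Prop := out = sort_by_placing_zeros_in_front_alt arr
instance (arr : List Int) (out : List Int) : Decidable (Spec_sort_by_placing_zeros_in_front arr out) := by unfold Spec_sort_by_placing_zeros_in_front; infer_instance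

-- ===== CLAIM (what is proved, stated in full; the proofs are below) =====
def Claim_equal_sort_by_placing_zeros_in_front : Prop := ∀ (arr : List Int), Dom_sort_by_placing_zeros_in_front arr → Spec_sort_by_placing_zeros_in_front arr (sort_by_placing_zeros_in_front arr)

-- ===== LEMMAS AND PROOFS =====

-- Invariant of A's first loop: starting from 'replicate nz 0 ++ t', processing xs (with room
-- xs.length ≤ t.length) yields 'replicate (nz + xs.count 0) 0 ++ t.drop (xs.count 0)'.
lemma loop1_inv (xs : List Int) : ∀ (nz : Nat) (t : List Int), xs.length ≤ t.length →
    xs.foldl (fun (s : List Int × Nat) arr_i =>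
      if arr_i = 0 then (s.1.set s.2 0, s.2 + 1) else s) (List.replicate nz 0 ++ t, nz)
    = (List.replicate (nz + xs.count 0) 0 ++ t.drop (xs.count 0), nz + xs.count 0) := by
  induction xs with
  | nil => intro nz t _; simp
  | cons x xs ih =>
    intro nz t ht
    match t with
    | [] => simp at ht
    | a :: t' =>
      by_cases hx : x = 0
      · subst hx
        simp only [List.foldl_cons, if_true]
        have hset : (List.replicate nz (0:Int) ++ a :: t').set nz 0
            = List.replicate (nz+1) (0:Int) ++ t' := by
          rw [List.set_append_right _ _ (by simp)]
          simp [List.replicate_succ']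
        rw [hset, ih (nz+1) t' (by simpa using ht)]
        simp
        omega
      · simp only [List.foldl_cons, if_neg hx]
        rw [ih nz (a :: t') (le_trans (Nat.le_succ _) ht)]
        simp [hx]

-- A's second loop: setting indices k..l.length to 1 yields 'take k ++ replicate (len-k) 1'.
lemma loop2_inv (m : Nat) : ∀ (l : List Int) (k : Nat), l.length = k + m →
    (PySem.List.pyRange (k : Int) (l.length : Int) 1).foldl (fun l i => l.set i.toNat 1) l
    = l.take k ++ List.replicate (l.length - k) 1 := by
  induction m with
  | zero =>
    intro l k h
    rw [PySem.List.pyRange_one_eq_nil (by omega)]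
    simp [h]
  | succ m ih =>
    intro l k h
    rw [PySem.List.pyRange_one_cons (by push_cast; omega)]
    simp only [List.foldl_cons, Int.toNat_natCast]
    have hlen : (l.set k 1).length = l.length := by simp
    have : ((k:Int) + 1) = ((k+1 : Nat) : Int) := by simp
    rw [this, ← hlen]
    rw [ih (l.set k 1) (k+1) (by omega)]
    have htake : (l.set k 1).take (k+1) = l.take k ++ [1] := by
      rw [List.set_eq_take_append_cons_drop, if_pos (by omega : k < l.length)]
      rw [List.take_append]
      simp [List.length_take, Nat.min_eq_left (by omega : k ≤ l.length)]
    rw [htake, hlen]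
    have : l.length - (k+1) + 1 = l.length - k := by omega
    simp [List.append_assoc, List.replicate_succ, ← this]

-- Invariant of B's bucket loop: processing xs appends the zeros of xs to the front bucket
-- and one 1 per non-zero element to the back bucket.
lemma bucket_inv (xs : List Int) : ∀ (f b : List Int),
    xs.foldl (fun (s : List Int × List Int) x =>
      if x = 0 then (s.1 ++ [0], s.2) else (s.1, s.2 ++ [1])) (f, b)
    = (f ++ List.replicate (xs.count 0) 0, b ++ List.replicate (xs.length - xs.count 0) 1) := by
  induction xs with
  | nil => intro f b; simp
  | cons x xs ih =>
    intro f b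
    by_cases hx : x = 0
    · subst hx
      simp only [List.foldl_cons, if_true]
      rw [ih]
      have hz : xs.count 0 ≤ xs.length := List.count_le_length
      have hc : List.count (0:Int) (0 :: xs) = List.count 0 xs + 1 := by simp
      have hl : (0 :: xs).length - (List.count (0:Int) xs + 1) = xs.length - List.count 0 xs := by
        simp only [List.length_cons]; omega
      rw [hc, hl, List.replicate_succ]
      simp [List.append_assoc]
    · simp only [List.foldl_cons, if_neg hx]
      rw [ih]
      have hz : xs.count 0 ≤ xs.length := List.count_le_length
      have h1 : (x :: xs).count 0 = xs.count 0 := by simp [hx]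
      have h2 : (x :: xs).length - (x :: xs).count 0 = xs.length - xs.count 0 + 1 := by
        simp [h1]; omega
      simp only [List.append_assoc, List.singleton_append, Prod.mk.injEq, List.length_cons]
      refine ⟨by rw [h1], ?_⟩
      rw [h1]
      have h3 : xs.length + 1 - List.count 0 xs = (xs.length - List.count 0 xs) + 1 := by omega
      rw [h3, List.replicate_succ]

-- ===== VERDICT (by name: the statement is the Claim_ definition above) =====
theorem sort_by_placing_zeros_in_front_spec : Claim_equal_sort_by_placing_zeros_in_front := by
  intro arr _
  unfold Spec_sort_by_placing_zeros_in_front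
  unfold sort_by_placing_zeros_in_front sort_by_placing_zeros_in_front_alt
  have hz : arr.count 0 ≤ arr.length := List.count_le_length
  have h1 := loop1_inv arr 0 arr (le_refl _)
  simp only [List.replicate_zero, List.nil_append, Nat.zero_add] at h1
  rw [h1, bucket_inv arr [] []]
  set z := arr.count 0 with hzdef
  have hlen : (List.replicate z (0:Int) ++ arr.drop z).length = arr.length := by
    simp; omega
  rw [loop2_inv (arr.length - z) _ z (by rw [hlen]; omega), hlen]
  have htake : (List.replicate z (0:Int) ++ arr.drop z).take z = List.replicate z 0 := by
    rw [List.take_append]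
    simp
  rw [htake]
  simp
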